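-- pv_equiv track=rewrite | github.com/NeuroPyPy/metricspace | py/util/analysis_functions.py | within_labels
-- ===== SOURCE A (Python) =====
-- def within_labels(arr, discrete=True):
--     sequential_count = 0
--     previous_value = None
--     result, event = [], []
--     for index, value in enumerate(arr):
--         if value != previous_value:
--             if previous_value is not None:
--                 middle_index = index - (sequential_count // 2)
--                 result.append(middle_index)
--                 event.append(arr[index - 1])
--                 sequential_count = 0
--             previous_value = value
--         sequential_count += 1
--
--         if index == len(arr) - 1:
--             event.append(arr[-1])
--             middle_index = index - (sequential_count // 2)
--             if discrete: # for arrays without middle values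
--                 result.append(middle_index + 1)
--             else:
--                 result.append(middle_index)
--
--     return result, event
-- ===== SOURCE B (Python) =====
-- def within_labels(arr, discrete=True):
--     # Boundary-index formulation: compute the list of run-boundary indices once,
--     # then derive midpoints and events purely arithmetically from consecutive boundaries.
--     n = len(arr)
--     if n == 0:
--         return [], []
--     bounds = [i for i in range(1, n) if arr[i] != arr[i - 1]]
--     starts = [0] + bounds
--     ends = bounds + [n]
--     event = [arr[e - 1] for e in ends]
--     result = []
--     for s, e in zip(starts, ends):
--         if e == n:
--             m = (n - 1) - (e - s) // 2
--             result.append(m + 1 if discrete else m)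
--         else:
--             result.append(e - (e - s) // 2)
--     return result, event
-- ===== Notes on version B (the rewrite author's own statement) =====
-- stated objective: alternative
-- what changed: Replaces A's single stateful scan (previous-value sentinel, running run-length counter, per-iteration last-index check) by a boundary-index formulation: build the list of indices where arr[i] != arr[i-1] once, pair consecutive boundaries with zip, and compute each midpoint arithmetically from the boundary pair.
import Mathlib
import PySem

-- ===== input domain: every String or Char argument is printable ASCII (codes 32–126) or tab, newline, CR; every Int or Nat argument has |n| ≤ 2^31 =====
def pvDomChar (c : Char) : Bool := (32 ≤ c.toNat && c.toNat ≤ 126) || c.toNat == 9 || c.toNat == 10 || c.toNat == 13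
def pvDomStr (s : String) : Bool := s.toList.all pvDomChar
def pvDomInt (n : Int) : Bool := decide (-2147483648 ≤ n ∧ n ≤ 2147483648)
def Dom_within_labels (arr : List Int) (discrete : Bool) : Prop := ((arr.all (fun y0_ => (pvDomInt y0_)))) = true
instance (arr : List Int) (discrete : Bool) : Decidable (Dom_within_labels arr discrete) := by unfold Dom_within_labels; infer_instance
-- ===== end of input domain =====

-- B replaces A's single stateful scan (previous-value sentinel, running counter, per-iteration
-- last-index check) by a boundary-index formulation: the boundary list is computed once and
-- midpoints/events derive arithmetically from consecutive boundary pairs (objective: alternative).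

-- ===== PORT A =====
-- A's loop, recursed structurally over the enumerated list; state = (sequential_count, previous_value, result, event).
def withinLabelsLoopA (arr : List Int) (discrete : Bool) :
    List (Int × Int) → Int × Option Int × List Int × List Int → List Int × List Int
  | [], (_, _, res, ev) => (res, ev)
  | (index, value) :: rest, (count0, prev0, res0, ev0) =>
    -- if value != previous_value: (None != int is always True, so 'some value ≠ prev')
    let st :=
      if some value ≠ prev0 then
        match prev0 with
        | some _ =>
          -- middle_index = index - (sequential_count // 2); result.append; event.append(arr[index-1])
          (0, some value,
            res0 ++ [index - PySem.Int.floordiv count0 2],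
            ev0 ++ [(PySem.List.pyGet? arr (index - 1)).getD 0])
        | none => (count0, some value, res0, ev0)
      else (count0, prev0, res0, ev0)
    let count := st.1 + 1
    -- if index == len(arr) - 1: event.append(arr[-1]); result.append(middle (+1 if discrete))
    let st2 :=
      if index = (arr.length : Int) - 1 then
        let mid := index - PySem.Int.floordiv count 2
        (st.2.2.1 ++ [if discrete then mid + 1 else mid],
         st.2.2.2 ++ [(PySem.List.pyGet? arr (-1)).getD 0])
      else (st.2.2.1, st.2.2.2)
    withinLabelsLoopA arr discrete rest (count, st.2.1, st2.1, st2.2)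

def within_labels (arr : List Int) (discrete : Bool) : List Int × List Int :=
  withinLabelsLoopA arr discrete (PySem.List.enumerate arr 0) (0, none, [], [])

-- ===== PORT B =====
-- B: bounds = [i for i in range(1, n) if arr[i] != arr[i-1]]; outputs from zip(starts, ends).
def within_labels_alt (arr : List Int) (discrete : Bool) : List Int × List Int :=
  let n : Int := (arr.length : Int)
  if arr.isEmpty then ([], [])
  else
    let bounds := (PySem.List.pyRange 1 n 1).filter
      (fun i => (PySem.List.pyGet? arr i).getD 0 != (PySem.List.pyGet? arr (i - 1)).getD 0)
    let starts := 0 :: bounds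
    let ends := bounds ++ [n]
    let event := ends.map (fun e => (PySem.List.pyGet? arr (e - 1)).getD 0)
    let result := (starts.zip ends).map (fun p =>
      if p.2 = n then
        let m := (n - 1) - PySem.Int.floordiv (p.2 - p.1) 2
        if discrete then m + 1 else m
      else p.2 - PySem.Int.floordiv (p.2 - p.1) 2)
    (result, event)

-- ===== PRECONDITION & SPEC =====
def Spec_within_labels (arr : List Int) (discrete : Bool) (out : List Int × List Int) : Prop := out = within_labels_alt arr discrete
instance (arr : List Int) (discrete : Bool) (out : List Int × List Int) : Decidable (Spec_within_labels arr discrete out) := by unfold Spec_within_labels; infer_instance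

-- ===== CLAIM (what is proved, stated in full; the proofs are below) =====
def Claim_equal_within_labels : Prop := ∀ (arr : List Int) (discrete : Bool), Dom_within_labels arr discrete → Spec_within_labels arr discrete (within_labels arr discrete)

-- ===== LEMMAS AND PROOFS =====

-- Common recursive specification: the run outputs for the suffix of boundaries in [k, n),
-- where s is the start index of the currently open run.
def runSpec (arr : List Int) (discrete : Bool) (k : Nat) (s : Int) : List Int × List Int :=
  if h : k < arr.length then
    if (PySem.List.pyGet? arr (k : Int)).getD 0 ≠ (PySem.List.pyGet? arr ((k : Int) - 1)).getD 0 then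
      let r := runSpec arr discrete (k + 1) (k : Int)
      (((k : Int) - PySem.Int.floordiv ((k : Int) - s) 2) :: r.1,
       (PySem.List.pyGet? arr ((k : Int) - 1)).getD 0 :: r.2)
    else runSpec arr discrete (k + 1) s
  else
    let m := ((arr.length : Int) - 1) - PySem.Int.floordiv ((arr.length : Int) - s) 2
    ([if discrete then m + 1 else m], [(PySem.List.pyGet? arr ((arr.length : Int) - 1)).getD 0])
termination_by arr.length - k

lemma loopA_eq_runSpec (arr : List Int) (discrete : Bool) :
    ∀ (l : List Int) (k : Nat) (res ev : List Int) (s : Int),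
      l ≠ [] → 1 ≤ k → k + l.length = arr.length → arr.drop k = l →
      withinLabelsLoopA arr discrete (PySem.List.enumerate l (k : Int))
          ((k : Int) - s, some ((PySem.List.pyGet? arr ((k : Int) - 1)).getD 0), res, ev)
        = (res ++ (runSpec arr discrete k s).1, ev ++ (runSpec arr discrete k s).2) := by
  intro l
  induction l with
  | nil => intro k res ev s hne; exact absurd rfl hne
  | cons x xs ih =>
    intro k res ev s _ hk1 hlen hdrop
    have hxk : arr[k]? = some x := by
      have h0 : (List.drop k arr)[0]? = arr[k + 0]? := List.getElem?_drop
      rw [hdrop] at h0; simpa using h0.symm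
    have hgetk : (PySem.List.pyGet? arr ((k : Nat) : Int)).getD 0 = x := by
      rw [PySem.List.pyGet?_natCast, hxk]; rfl
    have hkltn : k < arr.length := by simp at hlen; omega
    set p := (PySem.List.pyGet? arr ((k : Int) - 1)).getD 0 with hp
    rw [PySem.List.enumerate_cons]
    by_cases hxs : xs = []
    · -- last element: index k = n - 1
      subst hxs
      have hn : arr.length = k + 1 := by simp at hlen; omega
      have hkn : (k : Int) = (arr.length : Int) - 1 := by rw [hn]; push_cast; ring
      have hlast : arr.getLast? = some x := by
        rw [List.getLast?_eq_getElem?]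
        have h1 : arr.length - 1 = k := by omega
        rw [h1]; exact hxk
      have hev : (PySem.List.pyGet? arr (-1)).getD 0
          = (PySem.List.pyGet? arr ((arr.length : Int) - 1)).getD 0 := by
        rw [PySem.List.pyGet?_neg_one, hlast, ← hkn, PySem.List.pyGet?_natCast, hxk]
      by_cases hxp : x = p
      · -- same run continues; runSpec condition false
        subst hxp
        have hcond : ¬ ((PySem.List.pyGet? arr ((k : Nat) : Int)).getD 0
            ≠ (PySem.List.pyGet? arr (((k : Nat) : Int) - 1)).getD 0) := by
          rw [hgetk, ← hp]; simp
        rw [runSpec, dif_pos hkltn, if_neg hcond, runSpec, dif_neg (by omega)]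
        simp only [PySem.List.enumerate_nil, withinLabelsLoopA]
        simp only [ne_eq, not_true_eq_false, if_false, hkn]
        rw [hev, hn]
        simp
        have h2 : ((k : Int)) - s + 1 = (k : Int) + 1 - s := by ring
        rw [h2]
      · -- boundary at k, then final run of length 1
        have hcond : ((PySem.List.pyGet? arr ((k : Nat) : Int)).getD 0
            ≠ (PySem.List.pyGet? arr (((k : Nat) : Int) - 1)).getD 0) := by
          rw [hgetk, ← hp]; exact hxp
        rw [runSpec, dif_pos hkltn, if_pos hcond, runSpec, dif_neg (by omega)]
        simp only [PySem.List.enumerate_nil, withinLabelsLoopA]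
        have hsx : some x ≠ some p := by simpa using hxp
        simp only [hsx, ne_eq, not_false_iff, if_pos, hkn]
        rw [hev, hn]
        have h1 : ((k + 1 : Nat) : Int) - (k : Int) = 1 := by push_cast; ring
        have hc : ((k : Int)) = ((k + 1 : Nat) : Int) - 1 := by push_cast; ring
        rw [show ((k + 1 : Nat) : Int) - (((k + 1 : Nat) : Int) - 1) = 0 + 1 from by ring]
        simp [← hp]
    · -- middle element
      have hkn : ¬ ((k : Int) = (arr.length : Int) - 1) := by
        have h1 : xs.length ≠ 0 := by simpa using hxs
        simp at hlen ⊢; omega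
      have hdrop' : arr.drop (k + 1) = xs := by
        have h2 : arr.drop (k + 1) = (arr.drop k).drop 1 := by rw [List.drop_drop]
        rw [h2, hdrop]; rfl
      have hlen' : (k + 1) + xs.length = arr.length := by simp at hlen ⊢; omega
      have hprev' : (PySem.List.pyGet? arr (((k + 1 : Nat) : Int) - 1)).getD 0 = x := by
        have hc : ((k + 1 : Nat) : Int) - 1 = ((k : Nat) : Int) := by push_cast; ring
        rw [hc, hgetk]
      have hcast : ((k : Int) + 1) = ((k + 1 : Nat) : Int) := by push_cast; ring
      by_cases hxp : x = p
      · subst hxp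
        have hcond : ¬ ((PySem.List.pyGet? arr ((k : Nat) : Int)).getD 0
            ≠ (PySem.List.pyGet? arr (((k : Nat) : Int) - 1)).getD 0) := by
          rw [hgetk, ← hp]; simp
        rw [runSpec, dif_pos hkltn, if_neg hcond]
        have hthis := ih (k + 1) res ev s hxs (by omega) hlen' hdrop'
        rw [hprev'] at hthis
        simp only [withinLabelsLoopA]
        simp only [ne_eq, not_true_eq_false, if_false, if_neg hkn]
        have hc2 : (k : Int) - s + 1 = ((k + 1 : Nat) : Int) - s := by push_cast; ring
        rw [hc2, hcast]
        exact hthis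
      · have hcond : ((PySem.List.pyGet? arr ((k : Nat) : Int)).getD 0
            ≠ (PySem.List.pyGet? arr (((k : Nat) : Int) - 1)).getD 0) := by
          rw [hgetk, ← hp]; exact hxp
        rw [runSpec, dif_pos hkltn, if_pos hcond]
        have hthis := ih (k + 1) (res ++ [(k : Int) - PySem.Int.floordiv ((k : Int) - s) 2])
          (ev ++ [p]) (k : Int) hxs (by omega) hlen' hdrop'
        rw [hprev'] at hthis
        simp only [withinLabelsLoopA]
        have hsx : some x ≠ some p := by simpa using hxp
        simp only [hsx, ne_eq, not_false_iff, if_pos, if_neg hkn]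
        have hc2 : (0 : Int) + 1 = ((k + 1 : Nat) : Int) - (k : Int) := by push_cast; ring
        rw [hc2, hcast, ← hp]
        simpa using hthis

lemma altBuild_eq_runSpec (arr : List Int) (discrete : Bool) :
    ∀ (m k : Nat) (s : Int), arr.length - k = m → k ≤ arr.length →
      (let bounds := (PySem.List.pyRange (k : Int) (arr.length : Int) 1).filter
          (fun i => (PySem.List.pyGet? arr i).getD 0 != (PySem.List.pyGet? arr (i - 1)).getD 0)
       (((s :: bounds).zip (bounds ++ [(arr.length : Int)])).map (fun p =>
          if p.2 = (arr.length : Int) then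
            let m := ((arr.length : Int) - 1) - PySem.Int.floordiv (p.2 - p.1) 2
            if discrete then m + 1 else m
          else p.2 - PySem.Int.floordiv (p.2 - p.1) 2),
        (bounds ++ [(arr.length : Int)]).map (fun e => (PySem.List.pyGet? arr (e - 1)).getD 0)))
        = runSpec arr discrete k s := by
  intro m
  induction m with
  | zero =>
    intro k s hm hk
    have hkn : k = arr.length := by omega
    subst hkn
    rw [runSpec, dif_neg (by omega)]
    rw [PySem.List.pyRange_one_eq_nil (le_refl _)]
    simp
  | succ m ih =>
    intro k s hm hk
    have hklt : k < arr.length := by omega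
    have hkint : (k : Int) < (arr.length : Int) := by exact_mod_cast hklt
    rw [runSpec, dif_pos hklt]
    rw [PySem.List.pyRange_one_cons hkint]
    have hcast : ((k : Int) + 1) = ((k + 1 : Nat) : Int) := by push_cast; ring
    rw [hcast]
    have hih := fun s' => ih (k + 1) s' (by omega) (by omega)
    simp only [List.filter_cons]
    by_cases hcond : (PySem.List.pyGet? arr ((k : Nat) : Int)).getD 0
        ≠ (PySem.List.pyGet? arr (((k : Nat) : Int) - 1)).getD 0
    · rw [if_pos hcond]
      have hb : ((PySem.List.pyGet? arr ((k : Nat) : Int)).getD 0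
          != (PySem.List.pyGet? arr (((k : Nat) : Int) - 1)).getD 0) = true := by
        simpa [bne_iff_ne] using hcond
      rw [hb]
      simp only [if_true]
      have hkne : ((k : Int)) ≠ (arr.length : Int) := by omega
      simp only [List.zip_cons_cons, List.cons_append, List.map_cons, if_neg hkne]
      rw [← hih (k : Int)]
    · rw [if_neg hcond]
      have hb : ((PySem.List.pyGet? arr ((k : Nat) : Int)).getD 0
          != (PySem.List.pyGet? arr (((k : Nat) : Int) - 1)).getD 0) = false := by
        simpa [bne_iff_ne] using hcond
      rw [hb]
      simp only [Bool.false_eq_true, if_false]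
      exact hih s

-- ===== VERDICT (by name: the statement is the Claim_ definition above) =====
theorem within_labels_spec : Claim_equal_within_labels := by
  intro arr discrete _
  unfold Spec_within_labels
  match arr with
  | [] => simp [within_labels, within_labels_alt, withinLabelsLoopA, PySem.List.enumerate_nil]
  | a :: rest =>
    have hB := altBuild_eq_runSpec (a :: rest) discrete ((a :: rest).length - 1) 1 0 rfl
      (by simp)
    have halt : within_labels_alt (a :: rest) discrete = runSpec (a :: rest) discrete 1 0 := by
      rw [← hB]
      unfold within_labels_alt
      simp only [List.isEmpty_cons, Bool.false_eq_true, if_false]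
      push_cast
      rfl
    rw [halt]
    unfold within_labels
    rw [PySem.List.enumerate_cons]
    by_cases h : rest = []
    · subst h
      simp only [withinLabelsLoopA, PySem.List.enumerate_nil]
      rw [runSpec]
      simp [PySem.List.pyGet?_neg_one]
    · have hprev : (PySem.List.pyGet? (a :: rest) (((1 : Nat) : Int) - 1)).getD 0 = a := by
        norm_num [PySem.List.pyGet?_zero_cons]
      have key := loopA_eq_runSpec (a :: rest) discrete rest 1 [] [] 0 h (le_refl 1)
        (by simp [Nat.add_comm])
        (by simp)
      rw [hprev] at key
      have hkn : ¬ ((0 : Int) = (((a :: rest).length : Int)) - 1) := by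
        have : rest.length ≠ 0 := by simpa using h
        simp; omega
      simp only [withinLabelsLoopA]
      simp only [ne_eq, if_neg hkn, reduceCtorEq, not_false_iff, if_pos]
      have hc : ((0 : Int) + 1) = ((1 : Nat) : Int) - 0 := by norm_num
      rw [hc]
      simpa using key
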